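-- pv_equiv track=rewrite | github.com/CookieBoss03/snek | game.py | getCollidedPlayers
-- ===== SOURCE A (Python) =====
-- def getCollidedPlayers(positions):
--     collided_players = set()
--     # Find players with the same next position
--     positions_count = {}
--     for player_id, next_position in positions.items():
--         if next_position not in positions_count:
--             positions_count[next_position] = []
--         positions_count[next_position].append(player_id)
--
--     # Add players with collisions to collided_players set
--     for players in positions_count.values():
--         if len(players) > 1:
--             collided_players.update(players)
--     return collided_players
-- ===== SOURCE B (Python) =====
-- def getCollidedPlayers(positions):
--     vals = list(positions.values())
--     collided_players = set()
--     # For each distinct next position (first-occurrence order), rescan the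
--     # items whenever that position occurs more than once.
--     for pos in dict.fromkeys(vals):
--         if vals.count(pos) > 1:
--             collided_players.update(pid for pid, p in positions.items() if p == pos)
--     return collided_players
-- ===== Notes on version B (the rewrite author's own statement) =====
-- stated objective: alternative
-- what changed: B builds no dict of per-position id lists: it deduplicates the position values (dict.fromkeys), and for each distinct position whose list.count exceeds 1 it rescans positions.items() for the colliding player ids.
import Mathlib
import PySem

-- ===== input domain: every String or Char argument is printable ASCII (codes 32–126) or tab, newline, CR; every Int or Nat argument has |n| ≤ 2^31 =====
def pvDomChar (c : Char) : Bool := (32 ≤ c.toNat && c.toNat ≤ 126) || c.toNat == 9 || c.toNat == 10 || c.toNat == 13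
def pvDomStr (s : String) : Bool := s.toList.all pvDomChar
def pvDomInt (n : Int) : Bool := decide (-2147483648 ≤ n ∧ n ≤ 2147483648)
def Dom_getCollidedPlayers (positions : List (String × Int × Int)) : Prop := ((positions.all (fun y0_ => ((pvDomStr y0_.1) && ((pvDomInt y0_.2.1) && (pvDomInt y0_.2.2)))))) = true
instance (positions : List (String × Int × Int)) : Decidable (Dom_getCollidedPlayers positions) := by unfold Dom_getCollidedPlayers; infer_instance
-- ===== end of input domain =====

-- B replaces A's dict-of-id-lists grouping by dedup + count + rescan of the items
-- (alternative decomposition, same return value; the Python return value is a set,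
-- ported as its PySem.Set insertion-order list).


-- ===== PORT A =====
def getCollidedPlayers (positions : List (String × Int × Int)) : List String :=
  let d := PySem.Dict.ofList positions
  -- positions_count = {}; for player_id, next_position in positions.items(): …
  let positionsCount :=
    d.items.foldl
      (fun (pc : PySem.Dict (Int × Int) (List String)) pr =>
        let pc := if pc.contains pr.2 = false then pc.insert pr.2 [] else pc
        pc.modify pr.2 [] (fun l => l ++ [pr.1]))
      PySem.Dict.empty
  -- for players in positions_count.values(): if len(players) > 1: collided_players.update(players)
  positionsCount.values.foldl
    (fun (s : PySem.Set String) players =>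
      if 1 < PySem.List.len players then PySem.Set.update s players else s)
    PySem.Set.empty

-- ===== PORT B =====
def getCollidedPlayers_alt (positions : List (String × Int × Int)) : List String :=
  let d := PySem.Dict.ofList positions
  let vals := d.values
  -- for pos in dict.fromkeys(vals): if vals.count(pos) > 1: update(pid for pid, p in items if p == pos)
  (PySem.List.dedup vals).foldl
    (fun (s : PySem.Set String) pos =>
      if 1 < PySem.List.count vals pos then
        PySem.Set.update s ((d.items.filter (fun pr => pr.2 == pos)).map (·.1))
      else s)
    PySem.Set.empty

-- ===== PRECONDITION & SPEC =====
def Spec_getCollidedPlayers (positions : List (String × Int × Int)) (out : List String) : Prop := out = getCollidedPlayers_alt positions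
instance (positions : List (String × Int × Int)) (out : List String) : Decidable (Spec_getCollidedPlayers positions out) := by unfold Spec_getCollidedPlayers; infer_instance

-- ===== CLAIM (what is proved, stated in full; the proofs are below) =====
def Claim_equal_getCollidedPlayers : Prop := ∀ (positions : List (String × Int × Int)), Dom_getCollidedPlayers positions → Spec_getCollidedPlayers positions (getCollidedPlayers positions)

-- ===== LEMMAS AND PROOFS =====

-- A's "if pos not in pc: pc[pos] = []" followed by the append is one modify.
theorem step_collapse {κ ν : Type} [BEq κ] [LawfulBEq κ] (pc : PySem.Dict κ (List ν))
    (k : κ) (f : List ν → List ν) :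
    (if pc.contains k = false then pc.insert k [] else pc).modify k [] f
      = pc.modify k [] f := by
  by_cases h : pc.contains k = false
  · simp only [h, if_pos, PySem.Dict.modify, PySem.Dict.insert_insert_self,
      PySem.Dict.getD_insert_self, PySem.Dict.getD_of_not_contains pc [] h]
  · simp [h]

-- the grouping dict A builds, characterised
theorem groupDict_eq (items : List (String × Int × Int)) :
    items.foldl
      (fun (pc : PySem.Dict (Int × Int) (List String)) pr =>
        let pc := if pc.contains pr.2 = false then pc.insert pr.2 [] else pc
        pc.modify pr.2 [] (fun l => l ++ [pr.1]))
      PySem.Dict.empty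
    = items.foldl
      (fun (pc : PySem.Dict (Int × Int) (List String)) pr =>
        pc.modify pr.2 [] (fun l => l ++ [pr.1]))
      PySem.Dict.empty := by
  apply PySem.List.foldl_congr_mem
  intro pc pr _
  exact step_collapse pc pr.2 _

-- each group is the ids of the items carrying that position
theorem groupDict_getD (items : List (String × Int × Int)) (c : Int × Int) :
    (items.foldl
      (fun (pc : PySem.Dict (Int × Int) (List String)) pr =>
        pc.modify pr.2 [] (fun l => l ++ [pr.1]))
      PySem.Dict.empty).getD c []
    = (items.filter (fun pr => pr.2 == c)).map (·.1) := by
  have h := PySem.Dict.getD_foldl_modify_append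
    (items.map (fun pr => (pr.2, pr.1))) (PySem.Dict.empty (κ := Int × Int) (ν := List String)) c
  rw [List.foldl_map] at h
  simpa [List.filter_map, Function.comp] using h

-- len(group at k) is vals.count(k)
theorem len_group_eq_count (items : List (String × Int × Int)) (k : Int × Int) :
    PySem.List.len ((items.filter (fun pr => pr.2 == k)).map (·.1))
      = (PySem.List.count (items.map (·.2)) k : Int) := by
  simp [PySem.List.len, PySem.List.count, List.count_eq_countP,
    List.countP_eq_length_filter, List.filter_map, Function.comp_def, BEq.comm]

theorem getCollidedPlayers_eq_alt (positions : List (String × Int × Int)) :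
    getCollidedPlayers positions = getCollidedPlayers_alt positions := by
  simp only [getCollidedPlayers, getCollidedPlayers_alt]
  rw [show (PySem.Dict.ofList positions).values
        = (PySem.Dict.ofList positions).items.map (·.2) from rfl]
  generalize (PySem.Dict.ofList positions).items = items
  rw [groupDict_eq]
  set pc := items.foldl
      (fun (pc : PySem.Dict (Int × Int) (List String)) pr =>
        pc.modify pr.2 [] (fun l => l ++ [pr.1]))
      PySem.Dict.empty with hpc
  have hkeys : pc.keys = PySem.Set.ofList (items.map (·.2)) := by
    rw [hpc]
    rw [PySem.Dict.keys_foldl_modify_key items (fun pr => pr.2) []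
      (fun _ pr l => l ++ [pr.1]) PySem.Dict.empty]
    simp [PySem.Dict.keys_empty, PySem.Set.update_nil_left]
  have hnodup : pc.keys.Nodup := by
    rw [hkeys]; exact PySem.Set.nodup_ofList _
  have hvals : pc.values = pc.keys.map (fun k => pc.getD k []) :=
    PySem.Dict.values_eq_map_keys pc hnodup []
  rw [hvals, hkeys, List.foldl_map, PySem.List.dedup_eq_ofList]
  apply PySem.List.foldl_congr_mem
  intro s k _
  rw [hpc, groupDict_getD items k, len_group_eq_count items k]
  by_cases h : 1 < PySem.List.count (items.map (·.2)) k
  · rw [if_pos (by exact_mod_cast h), if_pos h]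
  · rw [if_neg (by exact_mod_cast h), if_neg h]

-- ===== VERDICT (by name: the statement is the Claim_ definition above) =====
theorem getCollidedPlayers_spec : Claim_equal_getCollidedPlayers := by
  intro positions _
  unfold Spec_getCollidedPlayers
  exact getCollidedPlayers_eq_alt positions
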